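-- pv_equiv track=rewrite | github.com/norok2/mnkgame | mnkgame/Board.py | extrema_to_moves
-- ===== SOURCE A (Python) =====
-- def extrema_to_moves(begin, end):
--     diff = tuple(y - x for x, y in zip(begin, end))
--     result = []
--     if abs(diff[0]) == abs(diff[1]) or diff[0] == 0 or diff[1] == 0:
--         coord = begin
--         for _ in range(max(abs(x) for x in diff) + 1):
--             result.append(coord)
--             coord = tuple(
--                 x + (1 if d > 0 else -1 if d < 0 else 0)
--                 for x, d in zip(coord, diff))
--     return result
-- ===== SOURCE B (Python) =====
-- def extrema_to_moves(begin, end):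
--     diff = tuple(y - x for x, y in zip(begin, end))
--     if not (abs(diff[0]) == abs(diff[1]) or diff[0] == 0 or diff[1] == 0):
--         return []
--     step = tuple((d > 0) - (d < 0) for d in diff)
--     n = max(abs(d) for d in diff)
--     return [tuple(b + i * s for b, s in zip(begin, step)) for i in range(n + 1)]
-- ===== Notes on version B (the rewrite author's own statement) =====
-- stated objective: alternative
-- what changed: Replaces the running-accumulator loop (each coordinate derived from the previous one) by a direct index-based closed form: each coordinate is computed as begin + i*step from its index i.
import Mathlib
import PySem

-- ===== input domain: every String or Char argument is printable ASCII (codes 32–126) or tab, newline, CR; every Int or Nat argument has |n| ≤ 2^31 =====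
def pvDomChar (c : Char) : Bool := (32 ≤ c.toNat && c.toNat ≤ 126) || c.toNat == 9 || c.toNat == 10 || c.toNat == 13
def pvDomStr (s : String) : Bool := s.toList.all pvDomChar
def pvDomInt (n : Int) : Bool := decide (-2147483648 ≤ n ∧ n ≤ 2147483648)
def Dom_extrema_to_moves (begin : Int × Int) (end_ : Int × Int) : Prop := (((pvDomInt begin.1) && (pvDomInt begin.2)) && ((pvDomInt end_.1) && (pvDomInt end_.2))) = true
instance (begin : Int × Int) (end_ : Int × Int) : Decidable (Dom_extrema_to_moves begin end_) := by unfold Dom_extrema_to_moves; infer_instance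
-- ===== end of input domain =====

-- B replaces A's running-accumulator loop by a direct index-based closed form (begin + i*step); alternative decomposition, same cost.

-- ===== PORT A =====
-- sign as A's chained conditional (1 if d > 0 else -1 if d < 0 else 0)
def pvSignA (d : Int) : Int := if d > 0 then 1 else if d < 0 then -1 else 0

def extrema_to_moves (begin : Int × Int) (end_ : Int × Int) : List (Int × Int) :=
  let diff : Int × Int := (end_.1 - begin.1, end_.2 - begin.2)
  if |diff.1| = |diff.2| ∨ diff.1 = 0 ∨ diff.2 = 0 then
    ((List.range (max diff.1.natAbs diff.2.natAbs + 1)).foldl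
      (fun (st : List (Int × Int) × (Int × Int)) _ =>
        (st.1 ++ [st.2], (st.2.1 + pvSignA diff.1, st.2.2 + pvSignA diff.2)))
      ([], begin)).1
  else []

-- ===== PORT B =====
-- sign as B computes it: (d > 0) - (d < 0)
def pvSignB (d : Int) : Int := (if d > 0 then (1:Int) else 0) - (if d < 0 then (1:Int) else 0)

def extrema_to_moves_alt (begin : Int × Int) (end_ : Int × Int) : List (Int × Int) :=
  let diff : Int × Int := (end_.1 - begin.1, end_.2 - begin.2)
  if ¬ (|diff.1| = |diff.2| ∨ diff.1 = 0 ∨ diff.2 = 0) then []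
  else
    let step : Int × Int := (pvSignB diff.1, pvSignB diff.2)
    let n := max diff.1.natAbs diff.2.natAbs
    (List.range (n + 1)).map (fun (i : Nat) => (begin.1 + (i : Int) * step.1, begin.2 + (i : Int) * step.2))

-- ===== PRECONDITION & SPEC =====
def Spec_extrema_to_moves (begin : Int × Int) (end_ : Int × Int) (out : List (Int × Int)) : Prop := out = extrema_to_moves_alt begin end_
instance (begin : Int × Int) (end_ : Int × Int) (out : List (Int × Int)) : Decidable (Spec_extrema_to_moves begin end_ out) := by unfold Spec_extrema_to_moves; infer_instance

-- ===== CLAIM (what is proved, stated in full; the proofs are below) =====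
def Claim_equal_extrema_to_moves : Prop := ∀ (begin : Int × Int) (end_ : Int × Int), Dom_extrema_to_moves begin end_ → Spec_extrema_to_moves begin end_ (extrema_to_moves begin end_)

-- ===== LEMMAS AND PROOFS =====

theorem pvSign_eq (d : Int) : pvSignA d = pvSignB d := by
  unfold pvSignA pvSignB; split_ifs <;> omega

theorem pvLoopA (s1 s2 : Int) (m : Nat) (acc : List (Int × Int)) (c : Int × Int) :
    (List.range m).foldl
      (fun (st : List (Int × Int) × (Int × Int)) _ =>
        (st.1 ++ [st.2], (st.2.1 + s1, st.2.2 + s2))) (acc, c)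
    = (acc ++ (List.range m).map (fun (i : Nat) => (c.1 + (i : Int) * s1, c.2 + (i : Int) * s2)),
       (c.1 + (m : Int) * s1, c.2 + (m : Int) * s2)) := by
  induction m generalizing acc c with
  | zero => simp
  | succ k ih =>
    rw [List.range_succ, List.foldl_append, ih]
    simp only [List.foldl_cons, List.foldl_nil, List.map_append, List.map_cons, List.map_nil,
      List.append_assoc, Prod.mk.injEq]
    refine ⟨trivial, ?_, ?_⟩ <;> (push_cast; ring)

-- ===== VERDICT (by name: the statement is the Claim_ definition above) =====
theorem extrema_to_moves_spec : Claim_equal_extrema_to_moves := by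
  unfold Claim_equal_extrema_to_moves
  intro b e _
  unfold Spec_extrema_to_moves extrema_to_moves extrema_to_moves_alt
  simp only [pvSign_eq]
  by_cases h : |e.1 - b.1| = |e.2 - b.2| ∨ e.1 - b.1 = 0 ∨ e.2 - b.2 = 0
  · simp only [h, if_pos, not_true_eq_false, if_neg, not_false_eq_true]
    rw [pvLoopA]
    simp
  · simp [h]
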